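-- pv_equiv track=rewrite | github.com/vmaza-dev/Progra_1-Reserva_de_turnos_medicos | turnos/cre_leer.py | validar_turno_por_especialidad
-- ===== SOURCE A (Python) =====
-- def filtrar_turnos(mat_turnos, filtro, inverso = False):
--     """
--     Filtra turnos según lo solicitado.
--
--     Si inverso True, filtra lo que no coincide.
--
--     Parámetros:
--         mat_turnos(list[list]): Matriz de turnos.
--         filtro(str|int|date): Clave de filtrado.
--         inverso(bool): Defecto False.
--
--     Returns:
--         Matriz de turno filtrada
--     """
--     turnos_filtrados = []
--     if inverso == False:
--         for turno in mat_turnos: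
--             if filtro in turno:
--                 turnos_filtrados.append(turno)
--     elif inverso == True:
--         for turno in mat_turnos:
--             if filtro not in turno:
--                 turnos_filtrados.append(turno)
--     return turnos_filtrados
--
-- def validar_turno_por_especialidad(mat_turnos, fecha_turno, especialidad, paciente):
--     """
--
--     Parámetros:
--
--     Returns:
--     """
--     valido = True
--     # 1 filtro por fecha
--     turnos_fecha = filtrar_turnos(mat_turnos, fecha_turno)
--     # 2 filtro por especialidad
--     turnos_por_especialidad = filtrar_turnos(turnos_fecha, especialidad)
--     # 3 veo si el paciente ya tiene turno con esta especialidad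
--     for turno in turnos_por_especialidad:
--         if paciente == turno[3]:
--             valido = False
--     return valido
-- ===== SOURCE B (Python) =====
-- def validar_turno_por_especialidad(mat_turnos, fecha_turno, especialidad, paciente):
--     return not any(fecha_turno in turno and especialidad in turno and paciente == turno[3]
--                    for turno in mat_turnos)
-- ===== Notes on version B (the rewrite author's own statement) =====
-- stated objective: simpler
-- what changed: Replaces the helper-based two-filter pipeline (which builds two intermediate lists and then scans the second) with a single short-circuiting not-any() over mat_turnos, building no intermediate lists.
-- outside the precondition, e.g. on validar_turno_por_especialidad([['d', 'e', 'x']], 'd', 'e', 'p'): A raises IndexError, B raises IndexError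
import Mathlib
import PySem

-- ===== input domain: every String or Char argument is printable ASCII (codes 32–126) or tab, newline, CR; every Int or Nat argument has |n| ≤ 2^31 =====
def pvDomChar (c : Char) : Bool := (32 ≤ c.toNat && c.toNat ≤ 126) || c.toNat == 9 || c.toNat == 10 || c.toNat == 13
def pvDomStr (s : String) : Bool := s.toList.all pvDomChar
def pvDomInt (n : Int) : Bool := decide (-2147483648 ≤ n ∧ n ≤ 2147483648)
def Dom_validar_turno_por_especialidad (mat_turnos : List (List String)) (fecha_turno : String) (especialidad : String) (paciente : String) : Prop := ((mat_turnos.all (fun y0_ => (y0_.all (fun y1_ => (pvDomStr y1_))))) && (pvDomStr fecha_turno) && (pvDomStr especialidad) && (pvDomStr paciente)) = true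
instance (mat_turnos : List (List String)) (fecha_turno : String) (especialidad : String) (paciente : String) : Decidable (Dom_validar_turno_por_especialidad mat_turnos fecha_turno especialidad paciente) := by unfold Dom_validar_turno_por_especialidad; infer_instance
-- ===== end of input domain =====

-- B replaces A's two intermediate-list filter passes with one short-circuiting not-any scan (objective: simpler).


-- ===== PORT A =====
-- helper 'filtrar_turnos': builds a new list, appending each turno that contains (or, inverso, does not contain) filtro
def filtrar_turnos (mat_turnos : List (List String)) (filtro : String) (inverso : Bool) : List (List String) :=
  if inverso == false then
    mat_turnos.foldl (fun acc turno => if turno.contains filtro then acc ++ [turno] else acc) []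
  else
    mat_turnos.foldl (fun acc turno => if turno.contains filtro then acc else acc ++ [turno]) []

-- A: filter by fecha, then by especialidad, then scan setting valido := false on a match.
-- turno[3] is PySem.List.pyGet? 3; Python raises IndexError when it is none (excluded by Pre_).
def validar_turno_por_especialidad (mat_turnos : List (List String)) (fecha_turno : String) (especialidad : String) (paciente : String) : Bool :=
  let turnos_fecha := filtrar_turnos mat_turnos fecha_turno false
  let turnos_por_especialidad := filtrar_turnos turnos_fecha especialidad false
  turnos_por_especialidad.foldl
    (fun valido turno => if PySem.List.pyGet? turno 3 == some paciente then false else valido) true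

-- ===== PORT B =====
-- B: not any(...) over mat_turnos, short-circuit conjunction, no intermediate lists.
def validar_turno_por_especialidad_alt (mat_turnos : List (List String)) (fecha_turno : String) (especialidad : String) (paciente : String) : Bool :=
  !(mat_turnos.any (fun turno =>
      turno.contains fecha_turno && turno.contains especialidad
        && PySem.List.pyGet? turno 3 == some paciente))

-- ===== PRECONDITION & SPEC =====
-- Pre_ excludes inputs on which Python A raises IndexError: a row containing both fecha_turno and
-- especialidad but having fewer than 4 entries.
def Pre_validar_turno_por_especialidad (mat_turnos : List (List String)) (fecha_turno : String) (especialidad : String) (paciente : String) : Prop :=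
  ∀ turno ∈ mat_turnos, fecha_turno ∈ turno → especialidad ∈ turno → 4 ≤ turno.length
instance (mat_turnos : List (List String)) (fecha_turno : String) (especialidad : String) (paciente : String) : Decidable (Pre_validar_turno_por_especialidad mat_turnos fecha_turno especialidad paciente) := by unfold Pre_validar_turno_por_especialidad; infer_instance

def pvWitness_validar_turno_por_especialidad : List (List String) × String × String × String :=
  ([["2024-01-01", "Garcia", "cardio", "Ana"], ["x"]], "2024-01-01", "cardio", "Ana")

def Spec_validar_turno_por_especialidad (mat_turnos : List (List String)) (fecha_turno : String) (especialidad : String) (paciente : String) (out : Bool) : Prop := out = validar_turno_por_especialidad_alt mat_turnos fecha_turno especialidad paciente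
instance (mat_turnos : List (List String)) (fecha_turno : String) (especialidad : String) (paciente : String) (out : Bool) : Decidable (Spec_validar_turno_por_especialidad mat_turnos fecha_turno especialidad paciente out) := by unfold Spec_validar_turno_por_especialidad; infer_instance

-- ===== CLAIM (what is proved, stated in full; the proofs are below) =====
def Claim_equal_validar_turno_por_especialidad : Prop := ∀ (mat_turnos : List (List String)) (fecha_turno : String) (especialidad : String) (paciente : String), Dom_validar_turno_por_especialidad mat_turnos fecha_turno especialidad paciente → Pre_validar_turno_por_especialidad mat_turnos fecha_turno especialidad paciente → Spec_validar_turno_por_especialidad mat_turnos fecha_turno especialidad paciente (validar_turno_por_especialidad mat_turnos fecha_turno especialidad paciente)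

-- ===== LEMMAS AND PROOFS =====

-- A's append-accumulator filter (inverso = false) is List.filter.
theorem filtrar_eq_filter (mat : List (List String)) (f : String) :
    filtrar_turnos mat f false = mat.filter (fun t => t.contains f) := by
  unfold filtrar_turnos
  simp only [beq_self_eq_true, if_true]
  suffices h : ∀ acc : List (List String),
      mat.foldl (fun acc turno => if turno.contains f then acc ++ [turno] else acc) acc
        = acc ++ mat.filter (fun t => t.contains f) by
    simpa using h []
  induction mat with
  | nil => intro acc; simp
  | cons t ts ih =>
    intro acc
    simp only [List.foldl_cons, List.filter_cons]
    by_cases h : t.contains f = true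
    · rw [if_pos h, ih, if_pos h]
      simp
    · rw [if_neg h, ih, if_neg h]

-- A's final loop over a list l computes: init && no element of l matches paciente at index 3.
theorem loop_eq_not_any (l : List (List String)) (pac : String) (v : Bool) :
    l.foldl (fun valido turno => if PySem.List.pyGet? turno 3 == some pac then false else valido) v
      = (v && !(l.any (fun turno => PySem.List.pyGet? turno 3 == some pac))) := by
  induction l generalizing v with
  | nil => simp
  | cons t ts ih =>
    simp only [List.foldl_cons, List.any_cons]
    rw [ih]
    by_cases h : (PySem.List.pyGet? t 3 == some pac) = true <;>
      simp [h]

theorem validar_turno_por_especialidad_spec : Claim_equal_validar_turno_por_especialidad := by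
  intro mat fecha_turno especialidad paciente _ _
  unfold Spec_validar_turno_por_especialidad validar_turno_por_especialidad
    validar_turno_por_especialidad_alt
  simp only [filtrar_eq_filter, loop_eq_not_any, Bool.true_and, List.filter_filter,
    List.any_filter]
  have h : ∀ a : List String,
      (a.contains especialidad && a.contains fecha_turno
          && (PySem.List.pyGet? a 3 == some paciente))
        = (a.contains fecha_turno && a.contains especialidad
          && (PySem.List.pyGet? a 3 == some paciente)) := by
    intro a
    simp [Bool.and_comm, Bool.and_left_comm, Bool.and_assoc]
  simp only [h]
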